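-- pv_equiv track=rewrite | github.com/ribhavfalwaria-grt1/multi-swe-bench | multi_swe_bench/harness/repos/cpp/googleapis/google_cloud_cpp_7058_to_5603.py | _detect_components_era2
-- ===== SOURCE A (Python) =====
-- _VALID_COMPONENTS = frozenset(
--     {
--         "storage",
--         "bigtable",
--         "spanner",
--         "pubsub",
--         "bigquery",
--         "iam",
--         "logging",
--     }
-- )
--
-- def _detect_components_era2(test_patch: str, fix_patch: str) -> str:
--     components = set()
--     for patch in (test_patch, fix_patch):
--         for line in patch.split("\n"):
--             if line.startswith("diff --git"):
--                 filepath = line.split(" b/")[-1]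
--                 parts = filepath.split("/")
--                 if len(parts) >= 3 and parts[0] == "google" and parts[1] == "cloud":
--                     comp = parts[2]
--                     if comp in _VALID_COMPONENTS:
--                         components.add(comp)
--     if not components:
--         return "storage,bigtable,spanner,pubsub"
--     return ",".join(sorted(components))
-- ===== SOURCE B (Python) =====
-- _SORTED_COMPONENTS = ("bigquery", "bigtable", "iam", "logging", "pubsub", "spanner", "storage")
--
--
-- def _detect_components_era2(test_patch: str, fix_patch: str) -> str:
--     paths = [line.split(" b/")[-1].split("/")[:3]
--              for line in test_patch.split("\n") + fix_patch.split("\n")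
--              if line.startswith("diff --git")]
--     found = [c for c in _SORTED_COMPONENTS if ["google", "cloud", c] in paths]
--     return ",".join(found) if found else "storage,bigtable,spanner,pubsub"
-- ===== Notes on version B (the rewrite author's own statement) =====
-- stated objective: idiomatic
-- what changed: Instead of scanning lines and accumulating matches in a set that is sorted at the end, B extracts all diff-header path prefixes in one comprehension and then iterates the fixed sorted component tuple, keeping each component whose ['google','cloud',comp] prefix occurs among the paths, so the set and the sort disappear and the output is built already in order.
import Mathlib
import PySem

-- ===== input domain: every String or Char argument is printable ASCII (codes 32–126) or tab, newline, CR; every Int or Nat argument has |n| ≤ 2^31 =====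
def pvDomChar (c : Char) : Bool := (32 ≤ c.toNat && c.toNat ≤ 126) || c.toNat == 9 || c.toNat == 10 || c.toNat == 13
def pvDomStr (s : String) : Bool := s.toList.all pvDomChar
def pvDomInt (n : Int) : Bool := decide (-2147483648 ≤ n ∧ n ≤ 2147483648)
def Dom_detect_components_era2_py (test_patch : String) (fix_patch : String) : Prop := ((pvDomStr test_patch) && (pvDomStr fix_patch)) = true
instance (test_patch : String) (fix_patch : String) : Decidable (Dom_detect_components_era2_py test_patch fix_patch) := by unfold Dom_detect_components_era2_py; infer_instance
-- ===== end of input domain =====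

-- B replaces A's line-scan that accumulates a set and sorts it at the end by one pass that
-- collects the diff-header path prefixes and then filters the fixed, already-sorted component
-- list by occurrence, so the set and the sort disappear (objective: idiomatic; same cost).

-- ===== PORT A =====
def pvValidComponents : List String :=
  ["storage", "bigtable", "spanner", "pubsub", "bigquery", "iam", "logging"]

def pvProcessLine (s : PySem.Set String) (line : String) : PySem.Set String :=
  if PySem.Str.startswith line "diff --git" then
    -- filepath = line.split(" b/")[-1]; the split list is never empty, so [-1] always hits
    let filepath := (PySem.List.pyGet? ((PySem.Str.split? line " b/").getD []) (-1)).getD ""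
    let parts := (PySem.Str.split? filepath "/").getD []
    match parts with
    | g :: cl :: comp :: _ =>
      if g == "google" && cl == "cloud" && pvValidComponents.contains comp
      then PySem.Set.add s comp else s
    | _ => s
  else s

def detect_components_era2_py (test_patch : String) (fix_patch : String) : String :=
  let components : PySem.Set String :=
    ((PySem.Str.split? fix_patch "\n").getD []).foldl pvProcessLine
      (((PySem.Str.split? test_patch "\n").getD []).foldl pvProcessLine PySem.Set.empty)
  if components.isEmpty then "storage,bigtable,spanner,pubsub"
  else PySem.Str.join "," (PySem.List.sorted components (fun x => x) false)

-- ===== PORT B =====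
def pvSortedComponents : List String :=
  ["bigquery", "bigtable", "iam", "logging", "pubsub", "spanner", "storage"]

-- line.split(" b/")[-1].split("/")[:3]
def pvHeaderPrefix (line : String) : List String :=
  PySem.List.slice
    ((PySem.Str.split? ((PySem.List.pyGet? ((PySem.Str.split? line " b/").getD []) (-1)).getD "") "/").getD [])
    none (some 3)

def detect_components_era2_py_alt (test_patch : String) (fix_patch : String) : String :=
  let paths :=
    (((PySem.Str.split? test_patch "\n").getD [] ++ (PySem.Str.split? fix_patch "\n").getD []).filter
      (fun l => PySem.Str.startswith l "diff --git")).map pvHeaderPrefix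
  let found := pvSortedComponents.filter (fun c => paths.contains ["google", "cloud", c])
  if found.isEmpty then "storage,bigtable,spanner,pubsub"
  else PySem.Str.join "," found

-- ===== PRECONDITION & SPEC =====
def Spec_detect_components_era2_py (test_patch : String) (fix_patch : String) (out : String) : Prop := out = detect_components_era2_py_alt test_patch fix_patch
instance (test_patch : String) (fix_patch : String) (out : String) : Decidable (Spec_detect_components_era2_py test_patch fix_patch out) := by unfold Spec_detect_components_era2_py; infer_instance

-- ===== CLAIM (what is proved, stated in full; the proofs are below) =====
def Claim_equal_detect_components_era2_py : Prop := ∀ (test_patch : String) (fix_patch : String), Dom_detect_components_era2_py test_patch fix_patch → Spec_detect_components_era2_py test_patch fix_patch (detect_components_era2_py test_patch fix_patch)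

-- ===== LEMMAS AND PROOFS =====

-- a line "hits" component c when it is a diff header whose path starts with google/cloud/c
def pvHit (l : String) (c : String) : Prop :=
  PySem.Str.startswith l "diff --git" = true ∧ pvHeaderPrefix l = ["google", "cloud", c]

theorem pv_mem_valid_iff_sorted (x : String) :
    x ∈ pvValidComponents ↔ x ∈ pvSortedComponents := by
  simp [pvValidComponents, pvSortedComponents]; tauto

theorem pv_mem_processLine (s : PySem.Set String) (l c : String) :
    c ∈ pvProcessLine s l ↔ c ∈ s ∨ (pvHit l c ∧ c ∈ pvValidComponents) := by
  unfold pvProcessLine pvHit pvHeaderPrefix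
  by_cases hs : PySem.Str.startswith l "diff --git" = true
  · simp only [hs, if_true, true_and]
    set parts := (PySem.Str.split? ((PySem.List.pyGet? ((PySem.Str.split? l " b/").getD []) (-1)).getD "") "/").getD [] with hparts
    have hslice : PySem.List.slice parts none (some 3) = parts.take 3 := by
      rw [show (3 : Int) = ((3 : Nat) : Int) by norm_num, PySem.List.slice_to_natCast]
    rw [hslice]
    match parts with
    | [] => simp
    | [a] => simp
    | [a, b] => simp
    | g :: cl :: comp :: rest =>
      simp only [List.take_succ_cons, List.take_zero, List.cons.injEq, and_true]
      by_cases hc : (g == "google" && cl == "cloud" && pvValidComponents.contains comp) = true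
      · simp only [hc, if_true, PySem.Set.mem_add]
        simp only [Bool.and_eq_true, beq_iff_eq, List.contains_eq_mem, decide_eq_true_eq] at hc
        obtain ⟨⟨hg, hcl⟩, hv⟩ := hc
        subst hg; subst hcl
        constructor
        · rintro (h | rfl)
          · exact Or.inl h
          · exact Or.inr ⟨⟨rfl, rfl, rfl⟩, hv⟩
        · rintro (h | ⟨⟨_, _, hcc⟩, _⟩)
          · exact Or.inl h
          · exact Or.inr hcc.symm
      · simp only [hc]
        constructor
        · exact Or.inl
        · rintro (h | ⟨⟨hg, hcl, hcc⟩, hv⟩)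
          · exact h
          · exfalso; apply hc
            subst hg; subst hcl; subst hcc
            simp [hv]
  · simp only [hs]
    simp

theorem pv_processLine_cases (s : PySem.Set String) (l : String) :
    pvProcessLine s l = s ∨ ∃ x, pvProcessLine s l = PySem.Set.add s x := by
  unfold pvProcessLine
  dsimp only
  split
  · split
    · split
      · exact Or.inr ⟨_, rfl⟩
      · exact Or.inl rfl
    · exact Or.inl rfl
  · exact Or.inl rfl

theorem pv_mem_foldl_process (lines : List String) (s : PySem.Set String) (c : String) :
    c ∈ lines.foldl pvProcessLine s ↔
      c ∈ s ∨ ∃ l ∈ lines, pvHit l c ∧ c ∈ pvValidComponents := by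
  induction lines generalizing s with
  | nil => simp
  | cons l ls ih =>
    simp only [List.foldl_cons, ih, pv_mem_processLine, List.mem_cons]
    constructor
    · rintro ((h | h) | ⟨l', hl', h⟩)
      · exact Or.inl h
      · exact Or.inr ⟨l, Or.inl rfl, h⟩
      · exact Or.inr ⟨l', Or.inr hl', h⟩
    · rintro (h | ⟨l', (rfl | hl'), h⟩)
      · exact Or.inl (Or.inl h)
      · exact Or.inl (Or.inr h)
      · exact Or.inr ⟨l', hl', h⟩

theorem pv_nodup_foldl_process (lines : List String) (s : PySem.Set String) (hs : s.Nodup) :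
    (lines.foldl pvProcessLine s).Nodup := by
  induction lines generalizing s with
  | nil => exact hs
  | cons l ls ih =>
    apply ih
    rcases pv_processLine_cases s l with h | ⟨x, h⟩
    · rw [h]; exact hs
    · rw [h]; exact PySem.Set.nodup_add _ _ hs

theorem detect_components_era2_py_spec : Claim_equal_detect_components_era2_py := by
  intro test_patch fix_patch _
  unfold Spec_detect_components_era2_py detect_components_era2_py detect_components_era2_py_alt
  rw [← List.foldl_append]
  set lines := (PySem.Str.split? test_patch "\n").getD [] ++ (PySem.Str.split? fix_patch "\n").getD [] with hlines
  set C := lines.foldl pvProcessLine PySem.Set.empty with hC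
  have hCmem : ∀ c, c ∈ C ↔ ∃ l ∈ lines, pvHit l c ∧ c ∈ pvValidComponents := by
    intro c; rw [hC, pv_mem_foldl_process]; simp [PySem.Set.empty]
  set paths := (lines.filter (fun l => PySem.Str.startswith l "diff --git")).map pvHeaderPrefix
    with hpaths
  have hcont : ∀ c ∈ pvSortedComponents,
      (paths.contains ["google", "cloud", c]) = decide (c ∈ C) := by
    intro c hcs
    have hcv : c ∈ pvValidComponents := (pv_mem_valid_iff_sorted c).mpr hcs
    rw [hpaths]
    simp only [List.contains_eq_mem, List.mem_map, List.mem_filter, decide_eq_decide,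
      hCmem c, pvHit]
    constructor
    · rintro ⟨l, ⟨hl, hsw⟩, hp⟩; exact ⟨l, hl, ⟨hsw, hp⟩, hcv⟩
    · rintro ⟨l, hl, ⟨hsw, hp⟩, _⟩; exact ⟨l, ⟨hl, hsw⟩, hp⟩
  set found := pvSortedComponents.filter (fun c => paths.contains ["google", "cloud", c])
    with hfound
  have hfound_eq : found = pvSortedComponents.filter (fun c => decide (c ∈ C)) := by
    rw [hfound]; exact List.filter_congr hcont
  have hCnodup : C.Nodup := pv_nodup_foldl_process lines PySem.Set.empty (by simp [PySem.Set.empty])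
  have hsnodup : pvSortedComponents.Nodup := by decide
  have hperm : found.Perm C := by
    rw [List.perm_ext_iff_of_nodup (hfound_eq ▸ hsnodup.filter _) hCnodup]
    intro x
    rw [hfound_eq]
    simp only [List.mem_filter, decide_eq_true_eq]
    constructor
    · rintro ⟨_, h⟩; exact h
    · intro hx
      refine ⟨?_, hx⟩
      obtain ⟨l, _, _, hv⟩ := (hCmem x).mp hx
      exact (pv_mem_valid_iff_sorted x).mp hv
  have hpair : found.Pairwise (fun a b => a < b) := by
    have h1 : pvSortedComponents.Pairwise (fun a b : String => a.toList < b.toList) := by decide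
    have h2 : pvSortedComponents.Pairwise (fun a b : String => a < b) :=
      h1.imp (fun h => String.lt_iff_toList_lt.mpr h)
    exact h2.filter _
  have hsorted : PySem.List.sorted C (fun x => x) false = found :=
    PySem.List.sorted_eq_of_perm_of_pairwise_lt C found (fun x => x) hperm hpair
  have hempty : C.isEmpty = found.isEmpty := by
    rcases C with _ | ⟨c, cs⟩
    · have := hperm.length_eq; simp at this
      simp [this]
    · have := hperm.length_eq
      rcases found with _ | ⟨f, fs⟩
      · simp at this
      · simp
  dsimp only
  rw [hsorted, hempty]
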